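-- pv_equiv track=rewrite | github.com/mwcoleman/nlp-morph-data-hallucination | non-neural alignment models/Baseline.py | wordAlign
-- ===== SOURCE A (Python) =====
-- def wordAlign(s1, s2):
--     # Inputs: two strings - lemma and target inflected form
--     # Outputs: (s1, s2) tuple of lists [pre, lemma, suff]
--
--     def substring(s):
--         return [s[i: j] for i in range(len(s))
--               for j in range(i + 1, len(s) + 1)]
--
--     # s1 is smallest word
--     rev=False
--     if len(s2)<len(s1):
--         rev=True
--         s1, s2 = s2, s1
--
--     # Return all substrings of s1 (descending length)
--     #
--     subs = sorted(substring(s1), key = lambda x: len(x), reverse=True)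
--
--     # Find the largest alignment
--     for sub in subs:
--         if sub in s2:
--             # Found longest match, split into pre stem suf..
--             s2g = s2.split(sub, maxsplit=2) # doesn't include the sub
--             s1g = s1.split(sub, maxsplit=2)
--             stem = sub
--
--             break
--
--     # Reverse the reversal if needed
--     if rev:
--         s1g,s2g = s2g, s1g
--
--     pre = (s1g[0], s2g[0])
--     suf = (s1g[1], s2g[1])
--
--     return (pre, stem, suf)
-- ===== SOURCE B (Python) =====
-- def wordAlign(s1, s2):
--     # DP (longest-common-substring table, one row at a time) instead of
--     # enumerating and sorting all substrings; same leftmost-longest stem, same splits.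
--     rev = len(s2) < len(s1)
--     if rev:
--         s1, s2 = s2, s1
--     best, start = 0, 0
--     prev = [0] * len(s2)
--     for i, ca in enumerate(s1):
--         cur = [(d + 1 if ca == cb else 0) for cb, d in zip(s2, [0] + prev)]
--         r = max(cur, default=0)
--         if r > best:
--             best, start = r, i - r + 1
--         prev = cur
--     stem = s1[start:start + best]
--     s1g = s1.split(stem, 2)
--     s2g = s2.split(stem, 2)
--     if rev:
--         s1g, s2g = s2g, s1g
--     return ((s1g[0], s2g[0]), stem, (s1g[1], s2g[1]))
-- ===== Notes on version B (the rewrite author's own statement) =====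
-- stated objective: faster
-- what changed: Replaces generate-all-substrings + stable sort by length + linear containment scan with the O(n*m) rolling-row longest-common-substring DP that tracks the longest (leftmost in the shorter word) match, then performs the identical splits.
import Mathlib
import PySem

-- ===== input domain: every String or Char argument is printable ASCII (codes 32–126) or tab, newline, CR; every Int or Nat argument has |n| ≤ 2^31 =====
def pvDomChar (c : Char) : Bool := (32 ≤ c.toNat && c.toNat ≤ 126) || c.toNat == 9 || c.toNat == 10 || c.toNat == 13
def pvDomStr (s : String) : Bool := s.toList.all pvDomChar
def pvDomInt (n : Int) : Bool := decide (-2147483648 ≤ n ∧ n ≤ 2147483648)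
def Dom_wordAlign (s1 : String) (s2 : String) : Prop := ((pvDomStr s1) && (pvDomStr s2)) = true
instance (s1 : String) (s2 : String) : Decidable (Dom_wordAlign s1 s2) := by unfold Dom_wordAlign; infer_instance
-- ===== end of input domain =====

-- B replaces A's enumerate-all-substrings + stable sort + containment scan with the O(n*m)
-- rolling-row longest-common-substring DP (same leftmost-longest stem, same splits).

-- ===== PORT A =====
-- Python A's nested helper `substring(s)`: all substrings s[i:j]
def wordAlignSubstring (s : String) : List String :=
  (PySem.List.pyRange 0 (PySem.Str.len s) 1).flatMap
    (fun i => (PySem.List.pyRange (i + 1) (PySem.Str.len s + 1) 1).map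
      (fun j => PySem.Str.slice s (some i) (some j)))

def wordAlign (s1 : String) (s2 : String) : (String × String) × String × (String × String) :=
  let rev := PySem.Str.len s2 < PySem.Str.len s1
  let p := if rev then (s2, s1) else (s1, s2)
  let t1 := p.1
  let t2 := p.2
  let subs := PySem.List.sorted (wordAlignSubstring t1) (fun x => PySem.Str.len x) true
  match subs.find? (fun sub => PySem.Str.isIn sub t2) with
  | none => (("", ""), "", ("", ""))  -- Python raises UnboundLocalError here; excluded by Pre_
  | some stem =>
    let s2g := (PySem.Str.splitMax? t2 stem 2).getD []
    let s1g := (PySem.Str.splitMax? t1 stem 2).getD []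
    let q := if rev then (s2g, s1g) else (s1g, s2g)
    ((PySem.List.pyGetD q.1 0 "", PySem.List.pyGetD q.2 0 ""), stem,
     (PySem.List.pyGetD q.1 1 "", PySem.List.pyGetD q.2 1 ""))

-- ===== PORT B =====
def wordAlign_alt (s1 : String) (s2 : String) : (String × String) × String × (String × String) :=
  let rev := PySem.Str.len s2 < PySem.Str.len s1
  let p := if rev then (s2, s1) else (s1, s2)
  let t1 := p.1
  let t2 := p.2
  let fin := (PySem.List.enumerate t1.toList 0).foldl
      (fun (st : List Int × Int × Int) ic =>
        let cur := (t2.toList.zip (0 :: st.1)).map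
            (fun cd => if ic.2 = cd.1 then cd.2 + 1 else 0)
        let r := PySem.List.maxD cur (fun x => x) 0
        if st.2.1 < r then (cur, r, ic.1 - r + 1) else (cur, st.2.1, st.2.2))
      (List.replicate t2.toList.length 0, 0, 0)
  let best := fin.2.1
  let start := fin.2.2
  let stem := PySem.Str.slice t1 (some start) (some (start + best))
  let s1g := (PySem.Str.splitMax? t1 stem 2).getD []
  let s2g := (PySem.Str.splitMax? t2 stem 2).getD []
  let q := if rev then (s2g, s1g) else (s1g, s2g)
  ((PySem.List.pyGetD q.1 0 "", PySem.List.pyGetD q.2 0 ""), stem,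
   (PySem.List.pyGetD q.1 1 "", PySem.List.pyGetD q.2 1 ""))

-- ===== PRECONDITION & SPEC =====
-- Pre_ excludes exactly the inputs on which A raises (UnboundLocalError: the two words
-- share no character, in particular when one of them is empty); B raises there too (ValueError).
def Pre_wordAlign (s1 : String) (s2 : String) : Prop := ∃ c ∈ s1.toList, c ∈ s2.toList
instance (s1 : String) (s2 : String) : Decidable (Pre_wordAlign s1 s2) :=
  decidable_of_iff (s1.toList.any (fun c => s2.toList.contains c) = true)
    (by simp [Pre_wordAlign, List.any_eq_true])

def pvWitness_wordAlign : String × String := ("a", "ab")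

def Spec_wordAlign (s1 : String) (s2 : String) (out : (String × String) × String × (String × String)) : Prop := out = wordAlign_alt s1 s2
instance (s1 : String) (s2 : String) (out : (String × String) × String × (String × String)) : Decidable (Spec_wordAlign s1 s2 out) := by unfold Spec_wordAlign; infer_instance

-- ===== CLAIM (what is proved, stated in full; the proofs are below) =====
def Claim_equal_wordAlign : Prop := ∀ (s1 : String) (s2 : String), Dom_wordAlign s1 s2 → Pre_wordAlign s1 s2 → Spec_wordAlign s1 s2 (wordAlign s1 s2)

-- ===== LEMMAS AND PROOFS =====

def pvGetEq (a b : List Char) (e j : Nat) : Bool :=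
  match a[e]?, b[j]? with
  | some x, some y => x = y
  | _, _ => false

def pvSuff (a b : List Char) : Nat → Nat → Nat
  | 0, j => if pvGetEq a b 0 j then 1 else 0
  | e + 1, 0 => if pvGetEq a b (e + 1) 0 then 1 else 0
  | e + 1, j + 1 => if pvGetEq a b (e + 1) (j + 1) then pvSuff a b e j + 1 else 0

theorem pvGetEq_iff (a b : List Char) (e j : Nat) :
    pvGetEq a b e j = true ↔ e < a.length ∧ j < b.length ∧ a[e]? = b[j]? := by
  unfold pvGetEq
  rcases ha : a[e]? with _ | x <;> rcases hb : b[j]? with _ | y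
  · simp only [List.getElem?_eq_none_iff] at ha hb
    simp
    omega
  · simp only [List.getElem?_eq_none_iff] at ha
    simp
  · simp only [List.getElem?_eq_none_iff] at hb
    simp
  · have he := (List.getElem?_eq_some_iff.1 ha).1
    have hj := (List.getElem?_eq_some_iff.1 hb).1
    simp [he, hj]

def pvSeg (a : List Char) (p L : Nat) : List Char := (a.drop p).take L

theorem pvSeg_succ (a : List Char) (p L : Nat) :
    pvSeg a p (L + 1) = pvSeg a p L ++ (a[p + L]?).toList := by
  unfold pvSeg
  rw [List.take_add_one]
  congr 1
  rw [List.getElem?_drop]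

theorem pvSeg_len (a : List Char) (p L : Nat) (h : p + L ≤ a.length) :
    (pvSeg a p L).length = L := by
  unfold pvSeg
  simp [List.length_take, List.length_drop]
  omega

def pvRHS (a b : List Char) (L e j : Nat) : Prop :=
  e < a.length ∧ j < b.length ∧ L ≤ e + 1 ∧ L ≤ j + 1 ∧
    pvSeg a (e + 1 - L) L = pvSeg b (j + 1 - L) L

theorem pvRHS_one (a b : List Char) (e j : Nat) :
    pvRHS a b 1 e j ↔ pvGetEq a b e j = true := by
  rw [pvGetEq_iff]
  unfold pvRHS pvSeg
  constructor
  · rintro ⟨he, hj, -, -, hseg⟩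
    refine ⟨he, hj, ?_⟩
    rw [List.take_one, Nat.add_sub_cancel, List.head?_drop] at hseg
    rw [List.take_one, Nat.add_sub_cancel, List.head?_drop] at hseg
    rw [List.getElem?_eq_getElem he, List.getElem?_eq_getElem hj] at hseg ⊢
    simpa using hseg
  · rintro ⟨he, hj, hx⟩
    refine ⟨he, hj, by omega, by omega, ?_⟩
    rw [List.take_one, Nat.add_sub_cancel, List.head?_drop,
      List.take_one, Nat.add_sub_cancel, List.head?_drop, hx]

theorem pvRHS_succ (a b : List Char) (L e j : Nat) (_hL : 1 ≤ L) :
    pvRHS a b (L + 1) (e + 1) (j + 1) ↔ (pvGetEq a b (e + 1) (j + 1) = true ∧ pvRHS a b L e j) := by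
  have hsplit : e + 1 + 1 - (L + 1) = e + 1 - L := by omega
  have hsplit2 : j + 1 + 1 - (L + 1) = j + 1 - L := by omega
  constructor
  · rintro ⟨he, hj, hLe, hLj, hseg⟩
    have hidx : (e + 1 - L) + L = e + 1 := by omega
    have hidx2 : (j + 1 - L) + L = j + 1 := by omega
    rw [hsplit, hsplit2, pvSeg_succ a _ L, pvSeg_succ b _ L, hidx, hidx2,
      List.getElem?_eq_getElem he, List.getElem?_eq_getElem hj] at hseg
    have hlen : (pvSeg a (e + 1 - L) L).length = (pvSeg b (j + 1 - L) L).length := by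
      rw [pvSeg_len a _ L (by omega), pvSeg_len b _ L (by omega)]
    obtain ⟨h1, h2⟩ := List.append_inj hseg hlen
    simp only [Option.toList_some, List.cons.injEq] at h2
    constructor
    · rw [pvGetEq_iff]
      exact ⟨he, hj, by rw [List.getElem?_eq_getElem he, List.getElem?_eq_getElem hj, h2.1]⟩
    · exact ⟨by omega, by omega, by omega, by omega, h1⟩
  · rintro ⟨hg, he', hj', hLe, hLj, hseg⟩
    rw [pvGetEq_iff] at hg
    obtain ⟨he, hj, hx⟩ := hg
    refine ⟨he, hj, by omega, by omega, ?_⟩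
    rw [hsplit, hsplit2, pvSeg_succ a _ L, pvSeg_succ b _ L, hseg]
    have hidx : (e + 1 - L) + L = e + 1 := by omega
    have hidx2 : (j + 1 - L) + L = j + 1 := by omega
    rw [hidx, hidx2, hx]

theorem pvSuff_ge_iff (a b : List Char) (L e j : Nat) (hL : 1 ≤ L) :
    L ≤ pvSuff a b e j ↔ pvRHS a b L e j := by
  induction e generalizing j L with
  | zero =>
    unfold pvSuff
    by_cases hg : pvGetEq a b 0 j = true
    · rw [if_pos hg]
      constructor
      · intro h
        have : L = 1 := by omega
        subst this
        exact (pvRHS_one a b 0 j).2 hg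
      · rintro ⟨-, -, hLe, -, -⟩
        omega
    · rw [if_neg hg]
      constructor
      · omega
      · intro hr
        have hL1 : L = 1 := by rcases hr with ⟨-, -, hLe, -, -⟩; omega
        subst hL1
        exact absurd ((pvRHS_one a b 0 j).1 hr) hg
  | succ e ih =>
    cases j with
    | zero =>
      unfold pvSuff
      by_cases hg : pvGetEq a b (e+1) 0 = true
      · rw [if_pos hg]
        constructor
        · intro h
          have : L = 1 := by omega
          subst this
          exact (pvRHS_one a b (e+1) 0).2 hg
        · rintro ⟨-, -, -, hLj, -⟩
          omega
      · rw [if_neg hg]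
        constructor
        · omega
        · intro hr
          have hL1 : L = 1 := by rcases hr with ⟨-, -, -, hLj, -⟩; omega
          subst hL1
          exact absurd ((pvRHS_one a b (e+1) 0).1 hr) hg
    | succ j =>
      unfold pvSuff
      by_cases hg : pvGetEq a b (e+1) (j+1) = true
      · rw [if_pos hg]
        rcases L with _ | L'
        · omega
        rcases L' with _ | L''
        · constructor
          · intro _; exact (pvRHS_one a b (e+1) (j+1)).2 hg
          · intro _; omega
        · rw [pvRHS_succ a b (L''+1) e j (by omega)]
          rw [Nat.add_le_add_iff_right, ih (L''+1) j (by omega)]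
          simp [hg]
      · rw [if_neg hg]
        constructor
        · omega
        · intro hr
          rcases L with _ | L'
          · omega
          rcases L' with _ | L''
          · exact absurd ((pvRHS_one a b (e+1) (j+1)).1 hr) hg
          · have := ((pvRHS_succ a b (L''+1) e j (by omega)).1 hr).1
            exact absurd this hg

def pvRowMax (a b : List Char) (e : Nat) : Nat :=
  ((List.range b.length).map (pvSuff a b e)).foldl max 0

def pvM (a b : List Char) : Nat → Nat
  | 0 => 0
  | i + 1 => max (pvM a b i) (pvRowMax a b i)

def pvE (a b : List Char) : Nat → Nat
  | 0 => 0
  | i + 1 => if pvM a b i < pvRowMax a b i then i else pvE a b i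

def pvLm (a b : List Char) : Nat := pvM a b a.length
def pvP (a b : List Char) : Nat := pvE a b a.length + 1 - pvLm a b

theorem pvSuff_le_left (a b : List Char) : ∀ e j, pvSuff a b e j ≤ e + 1 := by
  intro e
  induction e with
  | zero => intro j; unfold pvSuff; split <;> omega
  | succ e ih =>
    intro j
    cases j with
    | zero => unfold pvSuff; split <;> omega
    | succ j => unfold pvSuff; split
                · have := ih j; omega
                · omega

theorem le_pvRowMax (a b : List Char) (e j : Nat) (hj : j < b.length) :
    pvSuff a b e j ≤ pvRowMax a b e :=
  (PySem.List.le_foldl_max _ 0).2 _ (List.mem_map.2 ⟨j, List.mem_range.2 hj, rfl⟩)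

theorem pvRowMax_le (a b : List Char) (e : Nat) : pvRowMax a b e ≤ e + 1 := by
  rcases PySem.List.foldl_max_mem ((List.range b.length).map (pvSuff a b e)) 0 with h | h
  · unfold pvRowMax; omega
  · obtain ⟨j, -, hv⟩ := List.mem_map.1 h
    unfold pvRowMax
    rw [← hv]
    exact pvSuff_le_left a b e j

theorem pvRowMax_attained (a b : List Char) (e : Nat) :
    pvRowMax a b e = 0 ∨ ∃ j < b.length, pvSuff a b e j = pvRowMax a b e := by
  rcases PySem.List.foldl_max_mem ((List.range b.length).map (pvSuff a b e)) 0 with h | h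
  · left; exact h
  · right
    obtain ⟨j, hj, hv⟩ := List.mem_map.1 h
    exact ⟨j, List.mem_range.1 hj, hv⟩

theorem pvM_ge_row (a b : List Char) : ∀ i e, e < i → pvRowMax a b e ≤ pvM a b i := by
  intro i
  induction i with
  | zero => omega
  | succ i ih =>
    intro e he
    unfold pvM
    rcases Nat.lt_or_ge e i with h | h
    · have := ih e h; omega
    · have : e = i := by omega
      subst this; omega

theorem pvME_inv (a b : List Char) : ∀ i, pvM a b i = 0 ∨
    (pvE a b i < i ∧ pvRowMax a b (pvE a b i) = pvM a b i ∧
      ∀ e < pvE a b i, pvRowMax a b e < pvM a b i) := by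
  intro i
  induction i with
  | zero => left; rfl
  | succ i ih =>
    unfold pvM pvE
    by_cases hup : pvM a b i < pvRowMax a b i
    · right
      rw [if_pos hup]
      refine ⟨by omega, by omega, ?_⟩
      intro e he
      have := pvM_ge_row a b i e he
      omega
    · rw [if_neg hup]
      rcases ih with h0 | ⟨h1, h2, h3⟩
      · rcases Nat.eq_zero_or_pos (pvRowMax a b i) with hr | hr
        · left; omega
        · right
          rw [h0] at hup
          omega
      · right
        refine ⟨by omega, by omega, ?_⟩
        intro e he
        have := h3 e he
        omega

-- every common substring corresponds to a DP cell and vice versa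
theorem pvCommon_iff_cell (a b : List Char) (p L : Nat) (hL : 1 ≤ L) :
    (p + L ≤ a.length ∧ pvSeg a p L <:+: b) ↔ ∃ j, L ≤ pvSuff a b (p + L - 1) j := by
  constructor
  · rintro ⟨hpL, s, t, hb⟩
    refine ⟨s.length + L - 1, ?_⟩
    rw [pvSuff_ge_iff a b L _ _ hL]
    have hlb : b.length = s.length + L + t.length := by
      rw [← hb]
      simp [pvSeg_len a p L hpL]
      omega
    refine ⟨by omega, by omega, by omega, by omega, ?_⟩
    have h1 : p + L - 1 + 1 - L = p := by omega
    have h2 : s.length + L - 1 + 1 - L = s.length := by omega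
    rw [h1, h2]
    unfold pvSeg
    rw [← hb, List.append_assoc, List.drop_left, List.take_left' (pvSeg_len a p L hpL)]
    rfl
  · rintro ⟨j, hsuff⟩
    rw [pvSuff_ge_iff a b L _ _ hL] at hsuff
    obtain ⟨he, hj, hLe, hLj, hseg⟩ := hsuff
    have h1 : p + L - 1 + 1 - L = p := by omega
    rw [h1] at hseg
    refine ⟨by omega, ?_⟩
    rw [hseg]
    exact ((List.take_prefix _ _).isInfix).trans (List.drop_suffix _ _).isInfix

def pvRow (a b : List Char) (i : Nat) : List Int :=
  (List.range b.length).map (fun j => (pvSuff a b i j : Int))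

def pvPrev (a b : List Char) : Nat → List Int
  | 0 => List.replicate b.length (0 : Int)
  | i + 1 => pvRow a b i

def pvStart (a b : List Char) (i : Nat) : Int :=
  if pvM a b i = 0 then 0 else (pvE a b i : Int) + 1 - (pvM a b i : Int)

def pvStep (b : List Char) (st : List Int × Int × Int) (ic : Int × Char) :
    List Int × Int × Int :=
  let cur := (b.zip (0 :: st.1)).map (fun cd => if ic.2 = cd.1 then cd.2 + 1 else 0)
  let r := PySem.List.maxD cur (fun x => x) 0
  if st.2.1 < r then (cur, r, ic.1 - r + 1) else (cur, st.2.1, st.2.2)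

theorem pvGetEq_get (a b : List Char) (e j : Nat) (he : e < a.length) (hj : j < b.length) :
    pvGetEq a b e j = decide (a[e] = b[j]) := by
  unfold pvGetEq
  rw [List.getElem?_eq_getElem he, List.getElem?_eq_getElem hj]

theorem pvPrev_length (a b : List Char) (i : Nat) : (pvPrev a b i).length = b.length := by
  cases i <;> simp [pvPrev, pvRow]

theorem pvPrev_getElem (a b : List Char) (k j : Nat) (hj : j < b.length) :
    (0 :: pvPrev a b k)[j]'(by simp [pvPrev_length]; omega) =
      (match k, j with
       | 0, _ => (0 : Int)
       | _ + 1, 0 => 0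
       | k' + 1, j' + 1 => (pvSuff a b k' j' : Int)) := by
  match k, j with
  | 0, j => cases j <;> simp [pvPrev, List.getElem_replicate]
  | k' + 1, 0 => simp
  | k' + 1, j' + 1 => simp [pvPrev, pvRow]

theorem pvRow_step (a b : List Char) (k : Nat) (hk : k < a.length) :
    ((b.zip ((0 : Int) :: pvPrev a b k)).map
      (fun cd => if a[k] = cd.1 then cd.2 + 1 else 0)) = pvRow a b k := by
  apply List.ext_getElem
  · simp [pvPrev_length, pvRow]
  · intro j hj hj2
    simp only [pvRow, List.getElem_map, List.getElem_range] at hj2 ⊢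
    have hjm : j < b.length := by
      simpa [pvPrev_length] using hj
    rw [List.getElem_zip]
    simp only []
    have hchar := pvGetEq_get a b k j hk hjm
    rw [pvPrev_getElem a b k j hjm]
    match k, j with
    | 0, j =>
      show (if a[0] = b[j] then (0 : Int) + 1 else 0) = ((pvSuff a b 0 j : Nat) : Int)
      rw [show pvSuff a b 0 j = if pvGetEq a b 0 j then 1 else 0 from rfl,
        pvGetEq_get a b 0 j (by omega) hjm]
      by_cases h : a[0] = b[j] <;> simp [h]
    | k' + 1, 0 =>
      show (if a[k'+1] = b[0] then (0 : Int) + 1 else 0) = ((pvSuff a b (k'+1) 0 : Nat) : Int)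
      rw [show pvSuff a b (k'+1) 0 = if pvGetEq a b (k'+1) 0 then 1 else 0 from rfl,
        pvGetEq_get a b (k'+1) 0 hk hjm]
      by_cases h : a[k'+1] = b[0] <;> simp [h]
    | k' + 1, j' + 1 =>
      show (if a[k'+1] = b[j'+1] then (pvSuff a b k' j' : Int) + 1 else 0)
          = ((pvSuff a b (k'+1) (j'+1) : Nat) : Int)
      rw [show pvSuff a b (k'+1) (j'+1)
            = if pvGetEq a b (k'+1) (j'+1) then pvSuff a b k' j' + 1 else 0 from rfl,
        pvGetEq_get a b (k'+1) (j'+1) hk hjm]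
      by_cases h : a[k'+1] = b[j'+1] <;> simp [h]

theorem pvMaxD_row (a b : List Char) (k : Nat) :
    PySem.List.maxD (pvRow a b k) (fun x => x) 0 = (pvRowMax a b k : Int) := by
  unfold PySem.List.maxD
  rcases hm : PySem.List.max? (pvRow a b k) (fun x : Int => x) with _ | v
  · rw [PySem.List.max?_eq_none_iff] at hm
    have hb0 : b.length = 0 := by
      simpa [pvRow, List.map_eq_nil_iff, List.range_eq_nil] using hm
    simp only [Option.getD_none]
    unfold pvRowMax
    rw [hb0]
    simp
  · simp only [Option.getD_some]
    have hmem := PySem.List.max?_mem hm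
    have hmax := PySem.List.max?_isMax hm
    obtain ⟨j, hj, hv⟩ := List.mem_map.1 hmem
    have hjm := List.mem_range.1 hj
    apply le_antisymm
    · rw [← hv]
      exact_mod_cast le_pvRowMax a b k j hjm
    · rcases pvRowMax_attained a b k with h0 | ⟨j', hj', hvj⟩
      · rw [h0, ← hv]
        positivity
      · have : ((pvSuff a b k j' : Nat) : Int) ≤ v :=
          hmax _ (List.mem_map.2 ⟨j', List.mem_range.2 hj', rfl⟩)
        omega

theorem pvStep_inv (a b : List Char) (k : Nat) (hk : k < a.length) :
    pvStep b (pvPrev a b k, (pvM a b k : Int), pvStart a b k) ((k : Int), a[k]) =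
      (pvPrev a b (k + 1), (pvM a b (k + 1) : Int), pvStart a b (k + 1)) := by
  unfold pvStep
  simp only [pvRow_step a b k hk, pvMaxD_row a b k]
  by_cases h : pvM a b k < pvRowMax a b k
  · rw [if_pos (by exact_mod_cast h)]
    have hM : pvM a b (k + 1) = pvRowMax a b k := by
      show max (pvM a b k) (pvRowMax a b k) = _
      omega
    have hE : pvE a b (k + 1) = k := by
      show (if pvM a b k < pvRowMax a b k then k else pvE a b k) = k
      rw [if_pos h]
    have hS : pvStart a b (k + 1) = (k : Int) - (pvRowMax a b k : Int) + 1 := by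
      unfold pvStart
      rw [hM, hE, if_neg (by omega)]
      omega
    rw [hM, hS]
    rfl
  · rw [if_neg (by exact_mod_cast h)]
    have hM : pvM a b (k + 1) = pvM a b k := by
      show max (pvM a b k) (pvRowMax a b k) = _
      omega
    have hE : pvE a b (k + 1) = pvE a b k := by
      show (if pvM a b k < pvRowMax a b k then k else pvE a b k) = _
      rw [if_neg h]
    have hS : pvStart a b (k + 1) = pvStart a b k := by
      unfold pvStart
      rw [hM, hE]
    rw [hM, hS]
    rfl

theorem pvFold (a b : List Char) : ∀ (l : List Char) (k : Nat), l = a.drop k → k ≤ a.length →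
    (PySem.List.enumerate l (k : Int)).foldl (pvStep b)
        (pvPrev a b k, (pvM a b k : Int), pvStart a b k) =
      (pvPrev a b a.length, (pvLm a b : Int), pvStart a b a.length) := by
  intro l
  induction l with
  | nil =>
    intro k hl hk
    have : a.length ≤ k := by
      have := congrArg List.length hl
      simp at this
      omega
    have hkn : k = a.length := by omega
    subst hkn
    simp [PySem.List.enumerate, pvLm]
  | cons c rest ih =>
    intro k hl hk
    have hkn : k < a.length := by
      by_contra hc
      rw [List.drop_eq_nil_of_le (by omega)] at hl
      simp at hl
    have hdrop : a.drop k = a[k] :: a.drop (k + 1) := List.drop_eq_getElem_cons hkn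
    rw [hdrop] at hl
    injection hl with hc hrest
    rw [PySem.List.enumerate_cons, List.foldl_cons, hc, pvStep_inv a b k hkn]
    have hcast : (k : Int) + 1 = ((k + 1 : Nat) : Int) := by push_cast; ring
    rw [hcast]
    exact ih (k + 1) hrest (by omega)

theorem pvStart_final (a b : List Char) (hLm : 1 ≤ pvLm a b) :
    pvStart a b a.length = (pvP a b : Int) := by
  have hinv := pvME_inv a b a.length
  unfold pvStart pvP pvLm
  unfold pvLm at hLm
  rcases hinv with h0 | ⟨h1, h2, h3⟩
  · omega
  · rw [if_neg (by omega)]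
    have hle : pvM a b a.length ≤ pvE a b a.length + 1 := by
      have := pvRowMax_le a b (pvE a b a.length)
      omega
    omega

theorem pvFoldB (a b : List Char) (hLm : 1 ≤ pvLm a b) :
    (PySem.List.enumerate a 0).foldl (pvStep b)
        (List.replicate b.length (0 : Int), (0 : Int), (0 : Int)) =
      (pvPrev a b a.length, (pvLm a b : Int), (pvP a b : Int)) := by
  have h0 : ((List.replicate b.length (0 : Int), (0 : Int), (0 : Int)) :
      List Int × Int × Int) = (pvPrev a b 0, (pvM a b 0 : Int), pvStart a b 0) := rfl
  rw [h0, show (0 : Int) = ((0 : Nat) : Int) from rfl,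
    pvFold a b a 0 (by simp) (by omega), pvStart_final a b hLm]

-- stable sort keeps the relative order of equal keys
theorem pvInsertBy_filter {α κ : Type} [LinearOrder κ] (key : α → κ) (c : κ) (x : α) :
    ∀ S : List α, S.Pairwise (fun p q => key q ≤ key p) →
      (PySem.List.insertBy (fun p q => decide (key q < key p)) x S).filter
          (fun y => decide (key y = c)) =
        S.filter (fun y => decide (key y = c)) ++ (if key x = c then [x] else []) := by
  intro S
  induction S with
  | nil =>
    intro _
    show List.filter _ [x] = _
    by_cases h : key x = c <;> simp [h]
  | cons y ys ih =>
    intro hpw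
    rw [show PySem.List.insertBy (fun p q => decide (key q < key p)) x (y :: ys)
        = if decide (key y < key x) = true then x :: y :: ys
          else y :: PySem.List.insertBy (fun p q => decide (key q < key p)) x ys from rfl]
    by_cases hlt : key y < key x
    · rw [if_pos (by simpa using hlt)]
      by_cases hxc : key x = c
      · have hnil : (y :: ys).filter (fun z => decide (key z = c)) = [] := by
          rw [List.filter_eq_nil_iff]
          intro z hz
          have hzy : key z ≤ key y := by
            rcases List.mem_cons.1 hz with hz1 | hz2
            · exact le_of_eq (congrArg key hz1)
            · exact (List.pairwise_cons.1 hpw).1 z hz2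
          simp only [decide_eq_true_eq]
          intro hzc
          rw [hzc, ← hxc] at hzy
          exact absurd hzy (not_le.2 hlt)
        rw [List.filter_cons_of_pos (by simp [hxc]), hnil, if_pos hxc]
        rfl
      · rw [List.filter_cons_of_neg (by simp [hxc]), if_neg hxc, List.append_nil]
    · rw [if_neg (by simpa using hlt)]
      have htail := ih (List.pairwise_cons.1 hpw).2
      by_cases hyc : key y = c
      · rw [List.filter_cons_of_pos (by simp [hyc]), List.filter_cons_of_pos (by simp [hyc]),
          htail, List.cons_append]
      · rw [List.filter_cons_of_neg (by simp [hyc]), List.filter_cons_of_neg (by simp [hyc]),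
          htail]

theorem pvSorted_filter_key {α κ : Type} [LinearOrder κ] (key : α → κ) (c : κ) :
    ∀ xs : List α,
      (PySem.List.sorted xs key true).filter (fun y => decide (key y = c)) =
        xs.filter (fun y => decide (key y = c)) := by
  intro xs
  induction xs using List.reverseRecOn with
  | nil => rfl
  | append_singleton xs x ih =>
    have hstep : PySem.List.sorted (xs ++ [x]) key true
        = PySem.List.insertBy (fun p q => decide (key q < key p)) x
            (PySem.List.sorted xs key true) := by
      rw [PySem.List.sorted_rev_eq_foldl_insertBy, PySem.List.sorted_rev_eq_foldl_insertBy,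
        List.foldl_append]
      rfl
    rw [hstep, pvInsertBy_filter key c x _ (PySem.List.sorted_pairwise_rev xs key),
      ih, List.filter_append]
    by_cases hxc : key x = c <;> simp [hxc]

theorem pvFlatMap_congr {α β : Type} (l : List α) (g g' : α → List β)
    (h : ∀ i ∈ l, g i = g' i) : l.flatMap g = l.flatMap g' := by
  induction l with
  | nil => rfl
  | cons x xs ih =>
    rw [List.flatMap_cons, List.flatMap_cons, h x (List.mem_cons_self),
      ih (fun i hi => h i (List.mem_cons_of_mem x hi))]

theorem pvFlatMap_filter {α β : Type} (l : List α) (g : α → List β) (q : β → Bool) :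
    (l.flatMap g).filter q = l.flatMap (fun i => (g i).filter q) := by
  induction l with
  | nil => rfl
  | cons x xs ih => rw [List.flatMap_cons, List.flatMap_cons, List.filter_append, ih]

theorem pvFlatMap_if_singleton {α : Type} (l : List Nat) (Pp : Nat → Bool) (g : Nat → α) :
    l.flatMap (fun i => if Pp i then [g i] else []) = (l.filter Pp).map g := by
  induction l with
  | nil => rfl
  | cons x xs ih =>
    rw [List.flatMap_cons, ih]
    by_cases h : Pp x = true
    · rw [if_pos h, List.filter_cons_of_pos h, List.map_cons]
      rfl
    · rw [if_neg h, List.filter_cons_of_neg h, List.nil_append]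

theorem pvRange_filter_lt (R n : Nat) (h : R ≤ n) :
    (List.range n).filter (fun i => decide (i < R)) = List.range R := by
  induction n with
  | zero =>
    have : R = 0 := by omega
    subst this
    rfl
  | succ n ih =>
    rcases Nat.lt_or_ge R (n + 1) with h1 | h2
    · rw [List.range_succ, List.filter_append, ih (by omega)]
      have : (List.filter (fun i => decide (i < R)) [n]) = [] := by
        simp
        omega
      rw [this, List.append_nil]
    · have : R = n + 1 := by omega
      subst this
      apply List.filter_eq_self.2
      intro x hx
      simpa using List.mem_range.1 hx

theorem pvFind_map_range {α : Type} (f : Nat → α) (P : α → Bool) (R q : Nat) (hq : q < R)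
    (hP : P (f q) = true) (hlt : ∀ p < q, P (f p) = false) :
    ((List.range R).map f).find? P = some (f q) := by
  have hsplit : R = q + (R - q) := by omega
  rw [hsplit, List.range_add, List.map_append, List.find?_append]
  have h1 : ((List.range q).map f).find? P = none := by
    rw [List.find?_eq_none]
    intro x hx
    obtain ⟨p, hp, hfp⟩ := List.mem_map.1 hx
    rw [← hfp, hlt p (List.mem_range.1 hp)]
    simp
  rw [h1]
  have hRq : R - q = (R - q - 1) + 1 := by omega
  rw [hRq, List.range_succ_eq_map, List.map_cons, List.map_cons]
  simp only [Nat.add_zero, List.find?_cons, Option.none_or]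
  rw [hP]

-- toList of a Nat-cast slice is pvSeg
theorem pvToList_slice (t : String) (p L : Nat) :
    (PySem.Str.slice t (some (p : Int)) (some ((p : Int) + (L : Int)))).toList
      = pvSeg t.toList p L := by
  rw [PySem.Str.toList_slice]
  show PySem.List.slice t.toList (some (p : Int)) (some ((p : Int) + (L : Int))) = _
  rw [show ((p : Int) + (L : Int)) = ((p + L : Nat) : Int) by push_cast; ring,
    PySem.List.slice_natCast]
  unfold pvSeg
  congr 1
  omega

theorem wordAlignSubstring_eq (t1 : String) :
    wordAlignSubstring t1 = (List.range t1.toList.length).flatMap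
      (fun (i : Nat) => (List.range (t1.toList.length - i)).map
        (fun (k : Nat) => PySem.Str.slice t1 (some (i : Int)) (some ((i : Int) + 1 + (k : Int))))) := by
  unfold wordAlignSubstring
  rw [PySem.Str.len_eq, PySem.List.pyRange_zero_nat, List.flatMap_map]
  apply pvFlatMap_congr
  intro i _
  rw [PySem.List.pyRange_one]
  have : (((t1.toList.length : Int) + 1 - ((i : Int) + 1))).toNat = t1.toList.length - i := by
    omega
  rw [this, List.map_map]
  rfl

theorem pvSlice_len (t1 : String) (i k : Nat) (h : i + k < t1.toList.length) :
    PySem.Str.len (PySem.Str.slice t1 (some (i : Int)) (some ((i : Int) + 1 + (k : Int))))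
      = ((k + 1 : Nat) : Int) := by
  have harg : ((i : Int) + 1 + (k : Int)) = ((i : Int) + ((k + 1 : Nat) : Int)) := by
    push_cast; ring
  rw [harg, PySem.Str.len_eq, pvToList_slice, pvSeg_len t1.toList i (k + 1) (by omega)]

theorem pvSlice_toList (t1 : String) (i k : Nat) :
    (PySem.Str.slice t1 (some (i : Int)) (some ((i : Int) + 1 + (k : Int)))).toList
      = pvSeg t1.toList i (k + 1) := by
  have harg : ((i : Int) + 1 + (k : Int)) = ((i : Int) + ((k + 1 : Nat) : Int)) := by
    push_cast; ring
  rw [harg, pvToList_slice]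

theorem wordAlignSubstring_filter (t1 : String) (Lm : Nat) (h1 : 1 ≤ Lm) (h2 : Lm ≤ t1.toList.length) :
    (wordAlignSubstring t1).filter (fun x => decide (PySem.Str.len x = (Lm : Int)))
      = (List.range (t1.toList.length + 1 - Lm)).map
          (fun (p : Nat) => PySem.Str.slice t1 (some (p : Int)) (some ((p : Int) + (Lm : Int)))) := by
  have hn : t1.toList.length + 1 - Lm ≤ t1.toList.length := by omega
  rw [wordAlignSubstring_eq, pvFlatMap_filter]
  rw [pvFlatMap_congr _ _
      (fun i => if decide (i < t1.toList.length + 1 - Lm) = true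
        then [PySem.Str.slice t1 (some (i : Int)) (some ((i : Int) + 1 + ((Lm - 1 : Nat) : Int)))]
        else []) ?_]
  · rw [pvFlatMap_if_singleton, pvRange_filter_lt _ _ hn]
    apply List.map_congr_left
    intro p _
    have : ((p : Int) + 1 + ((Lm - 1 : Nat) : Int)) = ((p : Int) + (Lm : Int)) := by omega
    rw [this]
  · intro i hi
    have hin := List.mem_range.1 hi
    rw [List.filter_map]
    have hcong : (List.range (t1.toList.length - i)).filter
        ((fun x => decide (PySem.Str.len x = (Lm : Int))) ∘
          (fun (k : Nat) => PySem.Str.slice t1 (some (i : Int)) (some ((i : Int) + 1 + (k : Int)))))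
        = (List.range (t1.toList.length - i)).filter (fun k => decide (k = Lm - 1)) := by
      apply List.filter_congr
      intro k hk
      have hik : i + k < t1.toList.length := by
        have := List.mem_range.1 hk
        omega
      show decide (PySem.Str.len _ = (Lm : Int)) = decide (k = Lm - 1)
      rw [pvSlice_len t1 i k hik]
      rw [decide_eq_decide]
      omega
    rw [hcong, List.filter_eq, List.count_range]
    beta_reduce
    by_cases hc : Lm - 1 < t1.toList.length - i
    · rw [if_pos hc, if_pos (by simp only [decide_eq_true_eq]; omega)]
      rfl
    · rw [if_neg hc, if_neg (by simp only [decide_eq_true_eq]; omega)]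
      rfl

theorem pvLm_le (a b : List Char) : pvLm a b ≤ a.length := by
  rcases pvME_inv a b a.length with h0 | ⟨h1, h2, -⟩
  · unfold pvLm; omega
  · have := pvRowMax_le a b (pvE a b a.length)
    unfold pvLm
    omega

theorem pvLm_pos (a b : List Char) (h : ∃ c ∈ a, c ∈ b) : 1 ≤ pvLm a b := by
  obtain ⟨c, hca, hcb⟩ := h
  obtain ⟨e, he, hae⟩ := List.mem_iff_getElem.1 hca
  obtain ⟨j, hj, hbj⟩ := List.mem_iff_getElem.1 hcb
  have hg : pvGetEq a b e j = true := by
    rw [pvGetEq_get a b e j he hj]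
    simp [hae, hbj]
  have hs : 1 ≤ pvSuff a b e j := by
    rw [pvSuff_ge_iff a b 1 e j (by omega)]
    exact (pvRHS_one a b e j).2 hg
  have h1 := le_pvRowMax a b e j hj
  have h2 := pvM_ge_row a b a.length e he
  unfold pvLm
  omega

theorem wordAlignSubstring_len_le (t1 t2 : String) (x : String) (hx : x ∈ wordAlignSubstring t1)
    (hP : PySem.Str.isIn x t2 = true) :
    PySem.Str.len x ≤ ((pvLm t1.toList t2.toList : Nat) : Int) := by
  rw [wordAlignSubstring_eq] at hx
  obtain ⟨i, hi, hx2⟩ := List.mem_flatMap.1 hx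
  obtain ⟨k, hk, hx3⟩ := List.mem_map.1 hx2
  have hin := List.mem_range.1 hi
  have hkn : i + k < t1.toList.length := by
    have := List.mem_range.1 hk
    omega
  subst hx3
  rw [pvSlice_len t1 i k hkn]
  rw [PySem.Str.isIn_iff_infix, pvSlice_toList] at hP
  have hcell := (pvCommon_iff_cell t1.toList t2.toList i (k + 1) (by omega)).1
    ⟨by omega, hP⟩
  obtain ⟨j, hsuff⟩ := hcell
  have hjm : j < t2.toList.length := by
    have := (pvSuff_ge_iff t1.toList t2.toList (k + 1) _ _ (by omega)).1 hsuff
    exact this.2.1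
  have h1 := le_pvRowMax t1.toList t2.toList (i + (k + 1) - 1) j hjm
  have h2 := pvM_ge_row t1.toList t2.toList t1.toList.length (i + (k + 1) - 1) (by omega)
  unfold pvLm
  omega

theorem pvFindA (t1 t2 : String) (h : ∃ c ∈ t1.toList, c ∈ t2.toList) :
    (PySem.List.sorted (wordAlignSubstring t1) (fun x => PySem.Str.len x) true).find?
        (fun sub => PySem.Str.isIn sub t2)
      = some (PySem.Str.slice t1 (some ((pvP t1.toList t2.toList : Nat) : Int))
          (some (((pvP t1.toList t2.toList : Nat) : Int)
            + ((pvLm t1.toList t2.toList : Nat) : Int)))) := by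
  have hLm : 1 ≤ pvLm t1.toList t2.toList := pvLm_pos t1.toList t2.toList h
  have hLn : pvLm t1.toList t2.toList ≤ t1.toList.length := pvLm_le t1.toList t2.toList
  obtain ⟨hEn, hErow, hElt⟩ := (pvME_inv t1.toList t2.toList t1.toList.length).resolve_left
    (by unfold pvLm at hLm; omega)
  have hLE : pvLm t1.toList t2.toList ≤ pvE t1.toList t2.toList t1.toList.length + 1 := by
    have := pvRowMax_le t1.toList t2.toList (pvE t1.toList t2.toList t1.toList.length)
    unfold pvLm
    omega
  have hPE : pvP t1.toList t2.toList + pvLm t1.toList t2.toList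
      = pvE t1.toList t2.toList t1.toList.length + 1 := by
    unfold pvP
    omega
  -- the filtered-by-max-length list and its first containment match
  have hfind2 : (((List.range (t1.toList.length + 1 - pvLm t1.toList t2.toList)).map
      (fun (p : Nat) => PySem.Str.slice t1 (some (p : Int))
        (some ((p : Int) + (pvLm t1.toList t2.toList : Int))))).find?
        (fun sub => PySem.Str.isIn sub t2))
      = some (PySem.Str.slice t1 (some ((pvP t1.toList t2.toList : Nat) : Int))
          (some (((pvP t1.toList t2.toList : Nat) : Int)
            + ((pvLm t1.toList t2.toList : Nat) : Int)))) := by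
    apply pvFind_map_range
    · omega
    · rw [PySem.Str.isIn_iff_infix, pvToList_slice]
      rcases pvRowMax_attained t1.toList t2.toList
          (pvE t1.toList t2.toList t1.toList.length) with h0 | ⟨j, hj, hvj⟩
      · unfold pvLm at hLm; omega
      · have hcell : ∃ j, pvLm t1.toList t2.toList ≤ pvSuff t1.toList t2.toList
            (pvP t1.toList t2.toList + pvLm t1.toList t2.toList - 1) j := by
          refine ⟨j, ?_⟩
          rw [show pvP t1.toList t2.toList + pvLm t1.toList t2.toList - 1
              = pvE t1.toList t2.toList t1.toList.length by omega]
          unfold pvLm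
          omega
        exact ((pvCommon_iff_cell t1.toList t2.toList (pvP t1.toList t2.toList)
          (pvLm t1.toList t2.toList) hLm).2 hcell).2
    · intro p hp
      rw [← Bool.not_eq_true]
      intro hP
      rw [PySem.Str.isIn_iff_infix, pvToList_slice] at hP
      have hcell := (pvCommon_iff_cell t1.toList t2.toList p
        (pvLm t1.toList t2.toList) hLm).1 ⟨by omega, hP⟩
      obtain ⟨j, hsuff⟩ := hcell
      have hjm : j < t2.toList.length :=
        ((pvSuff_ge_iff t1.toList t2.toList _ _ _ hLm).1 hsuff).2.1
      have h1 := le_pvRowMax t1.toList t2.toList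
        (p + pvLm t1.toList t2.toList - 1) j hjm
      have hLmM : pvLm t1.toList t2.toList
          = pvM t1.toList t2.toList t1.toList.length := rfl
      have h2 := hElt (p + pvLm t1.toList t2.toList - 1) (by omega)
      omega
  rw [← List.head?_filter]
  set S := PySem.List.sorted (wordAlignSubstring t1) (fun x => PySem.Str.len x) true with hS
  set F := S.filter (fun sub => PySem.Str.isIn sub t2) with hF
  have hK : F.filter (fun x => decide (PySem.Str.len x = (pvLm t1.toList t2.toList : Int)))
      = ((List.range (t1.toList.length + 1 - pvLm t1.toList t2.toList)).map
          (fun (p : Nat) => PySem.Str.slice t1 (some (p : Int))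
            (some ((p : Int) + (pvLm t1.toList t2.toList : Int))))).filter
          (fun sub => PySem.Str.isIn sub t2) := by
    rw [hF, List.filter_comm, hS,
      pvSorted_filter_key (fun x => PySem.Str.len x) ((pvLm t1.toList t2.toList : Nat) : Int) (wordAlignSubstring t1),
      wordAlignSubstring_filter t1 (pvLm t1.toList t2.toList) hLm hLn]
  have hhead2 : (F.filter (fun x => decide (PySem.Str.len x
      = (pvLm t1.toList t2.toList : Int)))).head?
      = some (PySem.Str.slice t1 (some ((pvP t1.toList t2.toList : Nat) : Int))
          (some (((pvP t1.toList t2.toList : Nat) : Int)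
            + ((pvLm t1.toList t2.toList : Nat) : Int)))) := by
    rw [hK, List.head?_filter, hfind2]
  rcases hFc : F with _ | ⟨x, F'⟩
  · rw [hFc] at hhead2
    simp at hhead2
  · have hxF : x ∈ F := by rw [hFc]; exact List.mem_cons_self
    have hxSP := List.mem_filter.1 hxF
    have hxG : x ∈ wordAlignSubstring t1 := (PySem.List.mem_sorted _ _ _ x).1 hxSP.1
    have hlenle : PySem.Str.len x ≤ ((pvLm t1.toList t2.toList : Nat) : Int) :=
      wordAlignSubstring_len_le t1 t2 x hxG hxSP.2
    -- the first containment match has maximal length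
    have hxlen : PySem.Str.len x = ((pvLm t1.toList t2.toList : Nat) : Int) := by
      by_contra hne
      obtain ⟨y, ys, hFK⟩ : ∃ y ys, F.filter (fun x => decide (PySem.Str.len x
          = (pvLm t1.toList t2.toList : Int))) = y :: ys := by
        rcases hFK : F.filter (fun x => decide (PySem.Str.len x
            = (pvLm t1.toList t2.toList : Int))) with _ | ⟨y, ys⟩
        · rw [hFK] at hhead2; simp at hhead2
        · exact ⟨y, ys, rfl⟩
      have hyK : y ∈ F.filter (fun x => decide (PySem.Str.len x
          = (pvLm t1.toList t2.toList : Int))) := by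
        rw [hFK]; exact List.mem_cons_self
      have hyF := List.mem_filter.1 hyK
      have hylen : PySem.Str.len y = ((pvLm t1.toList t2.toList : Nat) : Int) := by
        simpa using hyF.2
      have hpw : F.Pairwise (fun p q => PySem.Str.len q ≤ PySem.Str.len p) :=
        List.Pairwise.sublist List.filter_sublist
          (PySem.List.sorted_pairwise_rev (wordAlignSubstring t1) (fun x => PySem.Str.len x))
      rw [hFc] at hpw hyF
      rcases List.mem_cons.1 hyF.1 with hy1 | hy2
      · rw [← hy1] at hne; exact hne (by rw [← hylen, hy1])
      · have := (List.pairwise_cons.1 hpw).1 y hy2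
        rw [hylen] at this
        exact hne (le_antisymm hlenle this)
    have hfilt : F.filter (fun x => decide (PySem.Str.len x
        = (pvLm t1.toList t2.toList : Int))) = x :: F'.filter (fun x =>
          decide (PySem.Str.len x = (pvLm t1.toList t2.toList : Int))) := by
      rw [hFc, List.filter_cons]
      rw [decide_eq_true hxlen]
      rfl
    rw [hfilt] at hhead2
    simp only [List.head?_cons, Option.some.injEq] at hhead2
    simp only [List.head?_cons, hhead2]

-- the inline DP loop of the B port is (definitionally) the fold of pvStep
theorem pvFoldB' (a b : List Char) (hLm : 1 ≤ pvLm a b) :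
    (PySem.List.enumerate a 0).foldl
        (fun (st : List Int × Int × Int) ic =>
          let cur := (b.zip (0 :: st.1)).map
              (fun cd => if ic.2 = cd.1 then cd.2 + 1 else 0)
          let r := PySem.List.maxD cur (fun x => x) 0
          if st.2.1 < r then (cur, r, ic.1 - r + 1) else (cur, st.2.1, st.2.2))
        (List.replicate b.length 0, 0, 0)
      = (pvPrev a b a.length, (pvLm a b : Int), (pvP a b : Int)) :=
  pvFoldB a b hLm

-- ===== VERDICT (by name: the statement is the Claim_ definition above) =====
set_option maxHeartbeats 1000000 in
theorem wordAlign_spec : Claim_equal_wordAlign := by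
  intro s1 s2 _ hpre
  have hpre' : ∃ c ∈ (if PySem.Str.len s2 < PySem.Str.len s1
        then (s2, s1) else (s1, s2)).1.toList,
      c ∈ (if PySem.Str.len s2 < PySem.Str.len s1 then (s2, s1) else (s1, s2)).2.toList := by
    by_cases hrev : PySem.Str.len s2 < PySem.Str.len s1
    · rw [if_pos hrev]
      obtain ⟨c, h1, h2⟩ := hpre
      exact ⟨c, h2, h1⟩
    · rw [if_neg hrev]
      exact hpre
  have hLm := pvLm_pos _ _ hpre'
  show wordAlign s1 s2 = wordAlign_alt s1 s2
  simp only [wordAlign, wordAlign_alt]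
  rw [pvFindA _ _ hpre', pvFoldB' _ _ hLm]
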